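-- pv_equiv track=rewrite | github.com/jrodriguezgar/FormuLite | shortfx/fxNumeric/number_theory_functions.py | stern_brocot
-- ===== SOURCE A (Python) =====
-- from typing import List
--
-- def stern_brocot(n: int) -> List[int]:
--     """Generates the first n elements of the Stern-Brocot sequence.
--
--     The sequence is: s(0)=0, s(1)=1, s(2n)=s(n), s(2n+1)=s(n)+s(n+1).
--
--     Args:
--         n: Number of elements to generate (>= 1).
--
--     Returns:
--         A list of the first n elements.
--
--     Raises:
--         TypeError: If n is not an integer.
--         ValueError: If n < 1.
--
--     Example:
--         >>> stern_brocot(10)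
--         [0, 1, 1, 2, 1, 3, 2, 3, 1, 4]
--
--     Complexity: O(n)
--     """
--     if not isinstance(n, int):
--         raise TypeError("n must be an integer.")
--
--     if n < 1:
--         raise ValueError("n must be >= 1.")
--
--     if n == 1:
--         return [0]
--
--     seq = [0, 1]
--
--     while len(seq) < n:
--         idx = len(seq) // 2
--
--         if len(seq) % 2 == 0:
--             seq.append(seq[idx])
--         else:
--             seq.append(seq[idx] + seq[idx + 1])
--
--     return seq[:n]
-- ===== SOURCE B (Python) =====
-- from typing import List
--
-- def stern_brocot(n: int) -> List[int]:
--     """Each element computed independently as fusc(i) via a bit loop over i."""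
--     if not isinstance(n, int):
--         raise TypeError("n must be an integer.")
--     if n < 1:
--         raise ValueError("n must be >= 1.")
--     out = []
--     for i in range(n):
--         a, b = 1, 0
--         m = i
--         while m:
--             if m & 1:
--                 b += a
--             else:
--                 a += b
--             m >>= 1
--         out.append(b)
--     return out
-- ===== Notes on version B (the rewrite author's own statement) =====
-- stated objective: alternative
-- what changed: Replaces the growing DP table (each new entry read from earlier entries) with an independent per-index fusc computation that keeps only two running integers and walks the binary digits of each index.
import Mathlib
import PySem

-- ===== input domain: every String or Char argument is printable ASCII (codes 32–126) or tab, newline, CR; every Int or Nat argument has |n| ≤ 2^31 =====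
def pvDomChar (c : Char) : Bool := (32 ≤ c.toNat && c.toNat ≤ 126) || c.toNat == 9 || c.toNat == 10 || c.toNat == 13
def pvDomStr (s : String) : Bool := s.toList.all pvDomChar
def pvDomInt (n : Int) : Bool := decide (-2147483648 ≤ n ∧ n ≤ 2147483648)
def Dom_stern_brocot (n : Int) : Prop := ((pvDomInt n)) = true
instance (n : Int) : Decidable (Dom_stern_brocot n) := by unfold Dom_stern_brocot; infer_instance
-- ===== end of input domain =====

-- B computes each element independently as fusc(i) by a bit loop over the index,
-- instead of A's growing DP table read back at earlier indices (alternative decomposition).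


-- ===== PORT A =====
-- while len(seq) < n: append seq[idx] (or seq[idx]+seq[idx+1]); the .getD 0 only
-- totalizes the in-range indexing (Python would raise IndexError, never reached here).
def sternLoopA (seq : List Int) (n : Nat) : List Int :=
  if _h : seq.length < n then
    let idx : Nat := seq.length / 2
    let app : Int :=
      if seq.length % 2 = 0 then
        (PySem.List.pyGet? seq (idx : Int)).getD 0
      else
        (PySem.List.pyGet? seq (idx : Int)).getD 0 + (PySem.List.pyGet? seq ((idx : Int) + 1)).getD 0
    sternLoopA (seq ++ [app]) n
  else seq
termination_by n - seq.length
decreasing_by simp; omega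

def stern_brocot (n : Int) : List Int :=
  if n < 1 then []  -- Python raises ValueError; excluded by Pre_
  else if n = 1 then [0]
  else PySem.List.slice (sternLoopA [0, 1] n.toNat) none (some n)

-- ===== PORT B =====
-- a, b = 1, 0; while m: if m & 1: b += a else: a += b; m >>= 1; return b
def fuscLoop (m : Nat) (a b : Int) : Int :=
  if m = 0 then b
  else if m % 2 = 1 then fuscLoop (m / 2) a (b + a)
  else fuscLoop (m / 2) (a + b) b
termination_by m
decreasing_by all_goals omega

def stern_brocot_alt (n : Int) : List Int :=
  if n < 1 then []  -- Python raises ValueError; excluded by Pre_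
  else (PySem.List.pyRange 0 n 1).map (fun i => fuscLoop i.toNat 1 0)

-- ===== PRECONDITION & SPEC =====
-- Pre_ excludes exactly n < 1, where Python A raises (ValueError); it raises TypeError
-- only for non-int n, which the type excludes.
def Pre_stern_brocot (n : Int) : Prop := 1 ≤ n
instance (n : Int) : Decidable (Pre_stern_brocot n) := by unfold Pre_stern_brocot; infer_instance
def pvWitness_stern_brocot : Int := (5)

def Spec_stern_brocot (n : Int) (out : List Int) : Prop := out = stern_brocot_alt n
instance (n : Int) (out : List Int) : Decidable (Spec_stern_brocot n out) := by unfold Spec_stern_brocot; infer_instance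

-- ===== CLAIM (what is proved, stated in full; the proofs are below) =====
def Claim_equal_stern_brocot : Prop := ∀ (n : Int), Dom_stern_brocot n → Pre_stern_brocot n → Spec_stern_brocot n (stern_brocot n)

-- ===== LEMMAS AND PROOFS =====

-- The Stern–Brocot / fusc function, the common value both ports compute.
def fusc : Nat → Int
  | 0 => 0
  | 1 => 1
  | (n + 2) =>
      if (n + 2) % 2 = 0 then fusc ((n + 2) / 2)
      else fusc ((n + 2) / 2) + fusc ((n + 2) / 2 + 1)
termination_by n => n
decreasing_by all_goals omega

lemma fusc_even (k : Nat) : fusc (2 * k) = fusc k := by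
  match k with
  | 0 => rfl
  | k + 1 =>
    have h : 2 * (k + 1) = 2 * k + 2 := by omega
    rw [h, fusc, if_pos (by omega), show (2 * k + 2) / 2 = k + 1 from by omega]

lemma fusc_odd (k : Nat) : fusc (2 * k + 1) = fusc k + fusc (k + 1) := by
  match k with
  | 0 => simp [fusc]
  | k + 1 =>
    have h : 2 * (k + 1) + 1 = (2 * k + 1) + 2 := by omega
    rw [h, fusc, if_neg (by omega), show ((2 * k + 1) + 2) / 2 = k + 1 from by omega]

lemma fuscLoop_eq (m : Nat) : ∀ a b : Int, fuscLoop m a b = a * fusc m + b * fusc (m + 1) := by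
  induction m using Nat.strong_induction_on with
  | _ m ih =>
    intro a b
    rw [fuscLoop]
    by_cases h0 : m = 0
    · simp [h0, fusc]
    · by_cases h1 : m % 2 = 1
      · rw [if_neg h0, if_pos h1, ih (m / 2) (by omega)]
        have hfm := fusc_odd (m / 2)
        rw [← show m = 2 * (m / 2) + 1 from by omega] at hfm
        have hf1 := fusc_even (m / 2 + 1)
        rw [← show m + 1 = 2 * (m / 2 + 1) from by omega] at hf1
        rw [hfm, hf1]
        ring
      · rw [if_neg h0, if_neg h1, ih (m / 2) (by omega)]
        have hfm := fusc_even (m / 2)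
        rw [← show m = 2 * (m / 2) from by omega] at hfm
        have hf1 := fusc_odd (m / 2)
        rw [← show m + 1 = 2 * (m / 2) + 1 from by omega] at hf1
        rw [hfm, hf1]
        ring

lemma sternLoopA_eq (n : Nat) : ∀ L : Nat, 2 ≤ L →
    sternLoopA ((List.range L).map fusc) n = (List.range (max L n)).map fusc := by
  intro L
  induction hL : n - L using Nat.strong_induction_on generalizing L with
  | _ d ih =>
    intro h2
    rw [sternLoopA]
    simp only [List.length_map, List.length_range]
    by_cases hlt : L < n
    · rw [dif_pos hlt]
      have hidx : L / 2 < L := by omega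
      have g1 : (PySem.List.pyGet? ((List.range L).map fusc) ((L / 2 : Nat) : Int)).getD 0
          = fusc (L / 2) := by
        rw [PySem.List.pyGet?_natCast]
        simp [hidx]
      have happ : (if L % 2 = 0 then
            (PySem.List.pyGet? ((List.range L).map fusc) ((L / 2 : Nat) : Int)).getD 0
          else
            (PySem.List.pyGet? ((List.range L).map fusc) ((L / 2 : Nat) : Int)).getD 0 +
              (PySem.List.pyGet? ((List.range L).map fusc) (((L / 2 : Nat) : Int) + 1)).getD 0)
          = fusc L := by
        by_cases hp : L % 2 = 0
        · have hfe := fusc_even (L / 2)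
          rw [← show L = 2 * (L / 2) from by omega] at hfe
          rw [if_pos hp, g1]
          exact hfe.symm
        · have hidx1 : L / 2 + 1 < L := by omega
          have g2 : (PySem.List.pyGet? ((List.range L).map fusc) (((L / 2 : Nat) : Int) + 1)).getD 0
              = fusc (L / 2 + 1) := by
            rw [show (((L / 2 : Nat) : Int) + 1) = ((L / 2 + 1 : Nat) : Int) by push_cast; ring,
              PySem.List.pyGet?_natCast]
            simp [hidx1]
          have hfo := fusc_odd (L / 2)
          rw [← show L = 2 * (L / 2) + 1 from by omega] at hfo
          rw [if_neg hp, g1, g2]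
          exact hfo.symm
      rw [happ, show (List.range L).map fusc ++ [fusc L] = (List.range (L + 1)).map fusc by
        rw [List.range_succ]; simp]
      rw [ih (n - (L + 1)) (by omega) (L + 1) rfl (by omega)]
      rw [show max (L + 1) n = max L n from by omega]
    · rw [dif_neg hlt]
      rw [show max L n = L from by omega]

lemma alt_eq_map_fusc (n : Int) (h : 1 ≤ n) :
    stern_brocot_alt n = (List.range n.toNat).map fusc := by
  unfold stern_brocot_alt
  rw [if_neg (by omega)]
  rw [PySem.List.pyRange_one]
  simp only [Int.sub_zero, List.map_map]
  apply List.map_congr_left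
  intro k _
  simp only [Function.comp]
  rw [show ((0 : Int) + (k : Int)).toNat = k by omega, fuscLoop_eq]
  simp

-- ===== VERDICT (by name: the statement is the Claim_ definition above) =====
theorem stern_brocot_spec : Claim_equal_stern_brocot := by
  intro n _hdom hpre
  unfold Spec_stern_brocot Pre_stern_brocot at *
  unfold stern_brocot
  rw [if_neg (by omega), alt_eq_map_fusc n hpre]
  by_cases h1 : n = 1
  · rw [if_pos h1, h1]
    simp [List.range_succ, fusc]
  · rw [if_neg h1]
    have h2 : 2 ≤ n := by omega
    have hinit : ([0, 1] : List Int) = (List.range 2).map fusc := by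
      simp [List.range_succ, fusc]
    rw [hinit, sternLoopA_eq n.toNat 2 (by omega)]
    rw [show max 2 n.toNat = n.toNat from by omega,
      show n = ((n.toNat : Nat) : Int) by omega, PySem.List.slice_to_natCast]
    simp only [Int.toNat_natCast]
    rw [← List.map_take, List.take_range]
    simp
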